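-- pv_equiv track=rewrite | github.com/DariuszLabaj/PlcCommunication | PlcCommunication/NormoSnif/dataTypes.py | to_bcd
-- ===== SOURCE A (Python) =====
-- def to_bcd(number):
--     """
--     Calculate and return packed BCD value of variable
--
--     :param number: int, list(int)
--     :return: int, list(int)
--     """
--     iteration = 0
--     if isinstance(number, int):
--         result = 0
--         while number > 0:
--             quotient, remainder = divmod(number, 10)
--             result += remainder << 4 * iteration
--             number = quotient
--             iteration += 1
--     elif isinstance(number, list):
--         result = []
--         for num in number:
--             if not isinstance(num, int):
--                 raise ValueError('list must contain ints')
--             partial_result = 0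
--             while num > 0:
--                 quotient, remainder = divmod(num, 10)
--                 partial_result += remainder << 4 * iteration
--                 num = quotient
--                 iteration += 1
--             result.append(partial_result)
--             iteration = 0
--     else:
--         raise ValueError('variable type not supported')
--
--     return result
-- ===== SOURCE B (Python) =====
-- def _pack(n):
--     # interpret the decimal digit string of n as hexadecimal nibbles (packed BCD)
--     if n <= 0:
--         return 0
--     acc = 0
--     for ch in str(n):
--         acc = acc * 16 + (ord(ch) - 48)
--     return acc
--
--
-- def to_bcd(number):
--     """
--     Calculate and return packed BCD value of variable
--
--     :param number: int, list(int)
--     :return: int, list(int)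
--     """
--     if isinstance(number, int):
--         return _pack(int(number))
--     if isinstance(number, list):
--         result = []
--         for num in number:
--             if not isinstance(num, int):
--                 raise ValueError('list must contain ints')
--             result.append(_pack(int(num)))
--         return result
--     raise ValueError('variable type not supported')
-- ===== Notes on version B (the rewrite author's own statement) =====
-- stated objective: simpler
-- what changed: B drops A's divmod/shift loop with its iteration counter and instead folds most-significant-first over the decimal digit string str(n), accumulating acc = acc*16 + digit (the 'read decimal digits as hex nibbles' view of packed BCD).
import Mathlib
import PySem

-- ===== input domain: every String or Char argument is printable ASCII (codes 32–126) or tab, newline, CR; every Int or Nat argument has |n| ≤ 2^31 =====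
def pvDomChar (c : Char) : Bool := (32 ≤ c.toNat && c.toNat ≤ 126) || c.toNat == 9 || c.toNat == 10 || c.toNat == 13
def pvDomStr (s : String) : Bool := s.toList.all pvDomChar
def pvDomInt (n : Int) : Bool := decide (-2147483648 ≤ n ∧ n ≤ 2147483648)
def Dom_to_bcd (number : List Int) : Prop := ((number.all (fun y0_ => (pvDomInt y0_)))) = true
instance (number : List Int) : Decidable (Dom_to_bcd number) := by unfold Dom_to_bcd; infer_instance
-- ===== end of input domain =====

-- B replaces A's divmod/shift loop by a most-significant-first fold over the decimal
-- digit string (acc*16 + digit), a simpler 'decimal digits as hex nibbles' view of packed BCD.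


-- ===== PORT A =====
-- inner 'while num > 0' loop of A's list branch (iteration counter 'it', accumulator 'acc')
def pvLoopA (num : Int) (it : Nat) (acc : Int) : Int :=
  if _h : num > 0 then
    -- quotient, remainder = divmod(num, 10); acc += remainder << 4*it
    pvLoopA (PySem.Int.floordiv num 10) (it + 1) (acc + (PySem.Int.mod num 10) <<< (4 * it))
  else acc
termination_by num.toNat
decreasing_by
  have h10 : (0:Int) < 10 := by norm_num
  rw [PySem.Int.floordiv_eq_ediv_of_pos h10]
  omega

def to_bcd (number : List Int) : List Int :=
  number.foldl (fun result num => result ++ [pvLoopA num 0 0]) []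

-- ===== PORT B =====
-- _pack: fold over str(n); 'ord(ch) - 48' ported as (c.toNat : Int) - 48 (exact: ord)
def pvPack (n : Int) : Int :=
  if n ≤ 0 then 0
  else (PySem.Int.toStr n).toList.foldl (fun acc c => acc * 16 + ((c.toNat : Int) - 48)) 0

def to_bcd_alt (number : List Int) : List Int :=
  number.map (fun num => pvPack num)

-- ===== PRECONDITION & SPEC =====
def Spec_to_bcd (number : List Int) (out : List Int) : Prop := out = to_bcd_alt number
instance (number : List Int) (out : List Int) : Decidable (Spec_to_bcd number out) := by unfold Spec_to_bcd; infer_instance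

-- ===== CLAIM (what is proved, stated in full; the proofs are below) =====
def Claim_equal_to_bcd : Prop := ∀ (number : List Int), Dom_to_bcd number → Spec_to_bcd number (to_bcd number)

-- ===== LEMMAS AND PROOFS =====

-- packed-BCD value of a natural number (reference function for both ports)
def pvBcd (n : Nat) : Int :=
  if h : n = 0 then 0 else pvBcd (n / 10) * 16 + (n % 10 : Int)
decreasing_by exact Nat.div_lt_self (Nat.pos_of_ne_zero h) (by norm_num)

-- decimal digit characters of n, most significant first (the value Nat.toDigits 10 computes)
def pvDigs (n : Nat) : List Char :=
  if n < 10 then [Nat.digitChar n] else pvDigs (n / 10) ++ [Nat.digitChar (n % 10)]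
decreasing_by exact Nat.div_lt_self (by omega) (by norm_num)

theorem pvToDigitsCore_eq (fuel : Nat) : ∀ (n : Nat) (ds : List Char), n < fuel →
    Nat.toDigitsCore 10 fuel n ds = pvDigs n ++ ds := by
  induction fuel with
  | zero => intro n ds h; omega
  | succ f ih =>
    intro n ds h
    rw [Nat.toDigitsCore]
    by_cases h10 : n < 10
    · have : n / 10 = 0 := Nat.div_eq_of_lt h10
      simp [this, pvDigs, h10, Nat.mod_eq_of_lt h10]
    · have hne : n / 10 ≠ 0 := Nat.ne_of_gt (Nat.div_pos (by omega) (by norm_num))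
      have hlt : n / 10 < f := by
        have := Nat.div_lt_self (show 0 < n by omega) (show 1 < 10 by norm_num)
        omega
      rw [if_neg hne, ih (n / 10) _ hlt]
      conv_rhs => rw [pvDigs]
      simp [h10]

theorem pvToDigits_eq (n : Nat) : Nat.toDigits 10 n = pvDigs n := by
  have := pvToDigitsCore_eq (n + 1) n [] (Nat.lt_succ_self n)
  simpa [Nat.toDigits] using this

theorem pvDigitChar_val (d : Nat) (h : d < 10) :
    ((Nat.digitChar d).toNat : Int) - 48 = (d : Int) := by
  interval_cases d <;> decide

theorem pvBcd_zero : pvBcd 0 = 0 := by rw [pvBcd]; simp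

theorem pvBcd_pos (n : Nat) (hz : n ≠ 0) :
    pvBcd n = pvBcd (n / 10) * 16 + ((n % 10 : Nat) : Int) := by
  conv_lhs => rw [pvBcd]
  rw [dif_neg hz]
  push_cast
  ring

theorem pvHorner (n : Nat) : ∀ (a : Int),
    (pvDigs n).foldl (fun acc c => acc * 16 + ((c.toNat : Int) - 48)) a
      = a * 16 ^ (pvDigs n).length + pvBcd n := by
  induction n using Nat.strong_induction_on with
  | _ n ih =>
    intro a
    by_cases h10 : n < 10
    · rw [pvDigs]; simp only [if_pos h10]
      simp [List.foldl, pvDigitChar_val n h10]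
      by_cases hz : n = 0
      · subst hz; rw [pvBcd_zero]; simp
      · rw [pvBcd_pos n hz, Nat.div_eq_of_lt h10, pvBcd_zero, Nat.mod_eq_of_lt h10]
        ring
    · rw [pvDigs]; simp only [if_neg h10]
      have hlt : n / 10 < n := Nat.div_lt_self (by omega) (by norm_num)
      rw [List.foldl_append, ih (n / 10) hlt a]
      simp only [List.foldl, List.length_append, List.length_singleton,
        pvDigitChar_val (n % 10) (Nat.mod_lt n (by norm_num))]
      rw [pvBcd_pos n (by omega)]
      ring

theorem pvShift_eq (r : Int) (k : Nat) : r <<< (4 * k) = r * 16 ^ k := by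
  rw [Int.shiftLeft_eq]
  congr 1
  rw [pow_mul]
  norm_num

theorem pvLoopA_eq (n : Nat) : ∀ (it : Nat) (acc : Int),
    pvLoopA (n : Int) it acc = acc + pvBcd n * 16 ^ it := by
  induction n using Nat.strong_induction_on with
  | _ n ih =>
    intro it acc
    rw [pvLoopA]
    by_cases hz : n = 0
    · subst hz; rw [pvBcd_zero]; simp
    · have hpos : (0:Int) < (n:Int) := by exact_mod_cast Nat.pos_of_ne_zero hz
      rw [dif_pos hpos]
      have h10 : (0:Int) < 10 := by norm_num
      have hfd : PySem.Int.floordiv (n : Int) 10 = ((n / 10 : Nat) : Int) := by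
        exact_mod_cast PySem.Int.floordiv_natCast n 10
      have hmd : PySem.Int.mod (n : Int) 10 = ((n % 10 : Nat) : Int) := by
        exact_mod_cast PySem.Int.mod_natCast n 10
      rw [hfd, hmd, ih (n / 10) (Nat.div_lt_self (Nat.pos_of_ne_zero hz) (by norm_num))]
      rw [pvShift_eq, pvBcd_pos n hz]
      ring

theorem pvElem_eq (num : Int) : pvLoopA num 0 0 = pvPack num := by
  by_cases h : num ≤ 0
  · rw [pvLoopA, pvPack]
    simp [h, show ¬ num > 0 by omega]
  · have hpos : 0 < num := by omega
    have hcast : ((num.toNat : Nat) : Int) = num := Int.toNat_of_nonneg (by omega)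
    rw [pvPack, if_neg h]
    rw [PySem.Int.toList_toStr]
    have : PySem.Int.toChars num = Nat.toDigits 10 num.toNat := by
      simp [PySem.Int.toChars, show ¬ num < 0 by omega]
    rw [this, pvToDigits_eq, pvHorner num.toNat 0]
    have := pvLoopA_eq num.toNat 0 0
    rw [hcast] at this
    rw [this]
    simp

-- ===== VERDICT (by name: the statement is the Claim_ definition above) =====
theorem to_bcd_spec : Claim_equal_to_bcd := by
  intro number _
  unfold Spec_to_bcd to_bcd to_bcd_alt
  rw [PySem.List.foldl_append_singleton_eq_map]
  exact List.map_congr_left (fun num _ => pvElem_eq num)
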